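-- pv_equiv track=rewrite | github.com/VicenteRamirez15/NonogramaPP | mecanicas.py | calcular_secuencias
-- ===== SOURCE A (Python) =====
-- def calcular_secuencias(linea):
--     secuencias = 0
--     valor_anterior = -1
--     enSecuencia = False
--     for valor in linea:
--         if valor != 0 and (not enSecuencia or valor_anterior!=valor):
--             secuencias += 1
--             enSecuencia = True
--         elif valor == 0:
--             enSecuencia = False
--         valor_anterior=valor
--     return secuencias
-- ===== SOURCE B (Python) =====
-- def calcular_secuencias(linea):
--     n = len(linea)
--     total = 0
--     i = 0
--     while i < n:
--         v = linea[i]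
--         if v != 0:
--             total += 1
--         j = i + 1
--         while j < n and linea[j] == v:
--             j += 1
--         i = j
--     return total
-- ===== Notes on version B (the rewrite author's own statement) =====
-- stated objective: alternative
-- what changed: B replaces A's stateful flag-tracking single pass (enSecuencia/valor_anterior) with a run-skipping traversal: at each position it counts the run if its value is nonzero and jumps over the whole maximal run of equal values.
import Mathlib
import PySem

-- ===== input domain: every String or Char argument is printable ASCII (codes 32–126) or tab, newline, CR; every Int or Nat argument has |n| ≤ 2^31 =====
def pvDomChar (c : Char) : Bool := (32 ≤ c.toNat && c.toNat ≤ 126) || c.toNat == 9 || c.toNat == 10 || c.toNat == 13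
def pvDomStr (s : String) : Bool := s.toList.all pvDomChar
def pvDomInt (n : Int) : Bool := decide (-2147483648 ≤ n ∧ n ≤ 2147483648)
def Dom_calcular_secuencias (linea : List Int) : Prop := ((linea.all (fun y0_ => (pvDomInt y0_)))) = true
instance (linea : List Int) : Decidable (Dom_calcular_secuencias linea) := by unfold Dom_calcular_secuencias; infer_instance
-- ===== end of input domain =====

-- B replaces A's stateful flag-tracking pass with a run-skipping traversal; 'alternative' objective, same cost.

-- ===== PORT A =====
-- for-loop over linea with state (secuencias, valor_anterior, enSecuencia)
def csLoop : List Int → Int → Int → Bool → Int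
  | [], s, _, _ => s
  | v :: rest, s, prev, enSeq =>
    if v ≠ 0 ∧ (enSeq = false ∨ prev ≠ v) then csLoop rest (s + 1) v true
    else if v = 0 then csLoop rest s v false
    else csLoop rest s v enSeq

def calcular_secuencias (linea : List Int) : Int := csLoop linea 0 (-1) false

-- ===== PORT B =====
-- run-skipping: count the head's run if nonzero, then skip the whole maximal run
-- (the inner 'while j < n and linea[j] == v' is the dropWhile of the run)
def calcular_secuencias_alt : List Int → Int
  | [] => 0
  | v :: rest =>
      (if v ≠ 0 then 1 else 0) + calcular_secuencias_alt (rest.dropWhile (· == v))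
termination_by l => l.length
decreasing_by
  exact Nat.lt_succ_of_le (List.Sublist.length_le (List.dropWhile_sublist _))

-- ===== PRECONDITION & SPEC =====
def Spec_calcular_secuencias (linea : List Int) (out : Int) : Prop := out = calcular_secuencias_alt linea
instance (linea : List Int) (out : Int) : Decidable (Spec_calcular_secuencias linea out) := by unfold Spec_calcular_secuencias; infer_instance

-- ===== CLAIM (what is proved, stated in full; the proofs are below) =====
def Claim_equal_calcular_secuencias : Prop := ∀ (linea : List Int), Dom_calcular_secuencias linea → Spec_calcular_secuencias linea (calcular_secuencias linea)

-- ===== LEMMAS AND PROOFS =====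

-- dropping a leading run of zeros does not change the count
theorem alt_dropWhile_zero (xs : List Int) :
    calcular_secuencias_alt (xs.dropWhile (· == (0 : Int))) = calcular_secuencias_alt xs := by
  cases xs with
  | nil => rfl
  | cons y ys =>
    by_cases hy : y = 0
    · subst hy
      simp [List.dropWhile, calcular_secuencias_alt]
    · have hb : (y == (0 : Int)) = false := by simp [hy]
      simp [List.dropWhile, hb]

-- loop invariant: from state (s, p, e) (with p ≠ 0 whenever e), the loop adds
-- the run count of the remaining list, with the current run of p coalesced when e
theorem csLoop_eq (l : List Int) : ∀ (s p : Int) (e : Bool), (e = true → p ≠ 0) →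
    csLoop l s p e = s + calcular_secuencias_alt (if e then l.dropWhile (· == p) else l) := by
  induction l with
  | nil => intro s p e _; cases e <;> simp [csLoop, calcular_secuencias_alt]
  | cons x xs ih =>
    intro s p e he
    cases e with
    | false =>
      by_cases hx : x = 0
      · subst hx
        rw [show csLoop (0 :: xs) s p false = csLoop xs s 0 false from by simp [csLoop]]
        rw [ih s 0 false (by simp)]
        simp [calcular_secuencias_alt, alt_dropWhile_zero]
      · rw [show csLoop (x :: xs) s p false = csLoop xs (s + 1) x true from by
            simp [csLoop, hx]]
        rw [ih (s + 1) x true (fun _ => hx)]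
        simp [calcular_secuencias_alt, hx]
        ring
    | true =>
      have hp : p ≠ 0 := he rfl
      by_cases hpx : p = x
      · subst hpx
        -- x = p ≠ 0, already inside this run: no count, state unchanged
        rw [show csLoop (p :: xs) s p true = csLoop xs s p true from by simp [csLoop, hp]]
        rw [ih s p true he]
        simp [List.dropWhile]
      · by_cases hx : x = 0
        · subst hx
          rw [show csLoop (0 :: xs) s p true = csLoop xs s 0 false from by simp [csLoop]]
          rw [ih s 0 false (by simp)]
          have h0p : ((0 : Int) == p) = false := beq_eq_false_iff_ne.mpr (Ne.symm hp)
          simp [List.dropWhile, h0p, calcular_secuencias_alt, alt_dropWhile_zero]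
        · -- x ≠ 0, x ≠ p: a new run begins here
          rw [show csLoop (x :: xs) s p true = csLoop xs (s + 1) x true from by
              simp [csLoop, hx, hpx]]
          rw [ih (s + 1) x true (fun _ => hx)]
          have hxp : (x == p) = false := beq_eq_false_iff_ne.mpr (Ne.symm hpx)
          simp [List.dropWhile, hxp, calcular_secuencias_alt, hx]
          ring

-- ===== VERDICT (by name: the statement is the Claim_ definition above) =====
theorem calcular_secuencias_spec : Claim_equal_calcular_secuencias := by
  intro linea _
  unfold Spec_calcular_secuencias calcular_secuencias
  rw [csLoop_eq linea 0 (-1) false (by simp)]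
  simp
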